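-- pv_equiv track=rewrite | github.com/23ksw10/Prgogrammers | Level 3/새 폴더/201514664.py | assignment
-- ===== SOURCE A (Python) =====
-- from typing import List
--
-- def assignment(fence: List[int]) -> int:
--     start_black = [1] #시작이 검은색인 리스트
--     start_white = [0] #시작이 흰색인 리스트
--     start=1
--     ans=0
--     while start<len(fence): #입력 받은 리스트의 길이만큼 위의 두 리스트를 채워넣는다
--         if start_black[start-1]==1: # 리스트값이
--             start_black.append(0)
--         else:
--             start_black.append(1)
--         if start_white[start-1]==1:
--             start_white.append(0)
--         else:
--             start_white.append(1)
--         start+=1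
--     start=0
--     ans_white = 0 #시작이 흰색일 경우 차이
--     ans_black = 0 #시작이 검은색일 경우 차이
--     while start < len(fence):
--
--         if start_black[start] != fence[start]: #비교하면서 다를 경우 증가
--             ans_black+=1
--
--         if start_white[start] != fence[start]: #비교하면서 다를 경우 증가
--             ans_white+=1
--
--         start += 1
--
--     ans=min(ans_white,ans_black) #최솟값을 답으로 정한다
--     return ans
-- ===== SOURCE B (Python) =====
-- from typing import List
--
-- def assignment(fence: List[int]) -> int:
--     hist = {}
--     for i, v in enumerate(fence):
--         k = (i % 2, v)
--         hist[k] = hist.get(k, 0) + 1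
--     match_black = hist.get((0, 1), 0) + hist.get((1, 0), 0)
--     match_white = hist.get((0, 0), 0) + hist.get((1, 1), 0)
--     return len(fence) - max(match_black, match_white)
-- ===== Notes on version B (the rewrite author's own statement) =====
-- stated objective: alternative
-- what changed: Replaces the two precomputed alternating pattern lists and mismatch-counting loops by one pass that builds a 4-bucket histogram dict keyed by (index parity, value), then derives both answers arithmetically as len(fence) minus the number of pattern matches and returns n - max(matches_black, matches_white).
import Mathlib
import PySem

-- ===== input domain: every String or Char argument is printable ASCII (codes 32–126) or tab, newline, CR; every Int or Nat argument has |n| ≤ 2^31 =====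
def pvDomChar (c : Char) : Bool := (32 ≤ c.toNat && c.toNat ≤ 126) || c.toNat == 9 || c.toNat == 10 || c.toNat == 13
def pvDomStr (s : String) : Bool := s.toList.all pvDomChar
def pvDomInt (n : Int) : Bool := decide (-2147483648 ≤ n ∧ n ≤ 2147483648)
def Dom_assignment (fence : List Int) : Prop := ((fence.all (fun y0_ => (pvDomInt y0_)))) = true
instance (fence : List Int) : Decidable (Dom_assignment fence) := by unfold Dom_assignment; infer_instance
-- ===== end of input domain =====

-- B replaces A's two precomputed alternating pattern lists and mismatch-counting loops by a
-- one-pass (index parity, value) histogram dict and arithmetic n - max(matches); objective: alternative.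


-- ===== PORT A =====
-- first while loop: extend start_black / start_white until they have len(fence) entries
-- (Python's start_black[start-1] is provably in range, so getD is exact there)
def fillLoop (n : Nat) (start : Nat) (sb sw : List Int) : List Int × List Int :=
  if _h : start < n then
    let sb' := sb ++ [if sb.getD (start - 1) 0 = 1 then (0 : Int) else 1]
    let sw' := sw ++ [if sw.getD (start - 1) 0 = 1 then (0 : Int) else 1]
    fillLoop n (start + 1) sb' sw'
  else (sb, sw)
  termination_by n - start

-- second while loop: accumulate (ans_black, ans_white); indices provably in range
def countLoop (fence sb sw : List Int) (start : Nat) (ab aw : Int) : Int × Int :=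
  if _h : start < fence.length then
    let ab' := if sb.getD start 0 ≠ fence.getD start 0 then ab + 1 else ab
    let aw' := if sw.getD start 0 ≠ fence.getD start 0 then aw + 1 else aw
    countLoop fence sb sw (start + 1) ab' aw'
  else (ab, aw)
  termination_by fence.length - start

def assignment (fence : List Int) : Int :=
  let lists := fillLoop fence.length 1 [1] [0]
  let counts := countLoop fence lists.1 lists.2 0 0 0
  min counts.2 counts.1

-- ===== PORT B =====
def assignment_alt (fence : List Int) : Int :=
  let hist : PySem.Dict (Int × Int) Int :=
    (PySem.List.enumerate fence 0).foldl
      (fun d p =>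
        let k := (PySem.Int.mod p.1 2, p.2)
        d.insert k (d.getD k 0 + 1))
      PySem.Dict.empty
  let matchBlack := hist.getD ((0 : Int), (1 : Int)) 0 + hist.getD ((1 : Int), (0 : Int)) 0
  let matchWhite := hist.getD ((0 : Int), (0 : Int)) 0 + hist.getD ((1 : Int), (1 : Int)) 0
  (fence.length : Int) - max matchBlack matchWhite

-- ===== PRECONDITION & SPEC =====
def Spec_assignment (fence : List Int) (out : Int) : Prop := out = assignment_alt fence
instance (fence : List Int) (out : Int) : Decidable (Spec_assignment fence out) := by unfold Spec_assignment; infer_instance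

-- ===== CLAIM (what is proved, stated in full; the proofs are below) =====
def Claim_equal_assignment : Prop := ∀ (fence : List Int), Dom_assignment fence → Spec_assignment fence (assignment fence)

-- ===== LEMMAS AND PROOFS =====

-- black pattern value at index i, and white pattern value
def fB (i : Nat) : Int := 1 - (i : Int) % 2
def fW (i : Nat) : Int := (i : Int) % 2

-- mismatch counts over a suffix, carried with its starting offset
def cb : List Int → Int → Int
  | [], _ => 0
  | x :: t, off => (if x ≠ 1 - off % 2 then 1 else 0) + cb t (off + 1)

def cw : List Int → Int → Int
  | [], _ => 0
  | x :: t, off => (if x ≠ off % 2 then 1 else 0) + cw t (off + 1)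

theorem getD_range_map (f : Nat → Int) (n i : Nat) (h : i < n) :
    (((List.range n).map f).getD i 0) = f i := by
  rw [List.getD_eq_getElem?_getD, List.getElem?_map, List.getElem?_range h]
  rfl

theorem fB_succ (s : Nat) : (if fB s = 1 then (0 : Int) else 1) = fB (s + 1) := by
  simp only [fB]
  push_cast
  rcases Nat.even_or_odd s with h | h
  · obtain ⟨k, hk⟩ := h; subst hk
    split_ifs with h1 <;> omega
  · obtain ⟨k, hk⟩ := h; subst hk
    split_ifs with h1 <;> omega

theorem fW_succ (s : Nat) : (if fW s = 1 then (0 : Int) else 1) = fW (s + 1) := by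
  simp only [fW]
  push_cast
  rcases Nat.even_or_odd s with h | h
  · obtain ⟨k, hk⟩ := h; subst hk
    split_ifs with h1 <;> omega
  · obtain ⟨k, hk⟩ := h; subst hk
    split_ifs with h1 <;> omega

theorem fill_eq (n : Nat) : ∀ (start : Nat), 1 ≤ start → start ≤ n →
    fillLoop n start ((List.range start).map fB) ((List.range start).map fW)
      = ((List.range n).map fB, (List.range n).map fW) := by
  intro start h1 hn
  induction hd : n - start generalizing start with
  | zero =>
    have : start = n := by omega
    subst this
    rw [fillLoop]
    simp
  | succ k ih =>
    have hlt : start < n := by omega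
    rw [fillLoop]
    simp only [hlt, dif_pos]
    have hsb : ((List.range start).map fB).getD (start - 1) 0 = fB (start - 1) :=
      getD_range_map _ _ _ (by omega)
    have hsw : ((List.range start).map fW).getD (start - 1) 0 = fW (start - 1) :=
      getD_range_map _ _ _ (by omega)
    rw [hsb, hsw]
    have hs : start - 1 + 1 = start := by omega
    have hb : (List.range start).map fB ++ [if fB (start - 1) = 1 then (0:Int) else 1]
        = (List.range (start + 1)).map fB := by
      rw [fB_succ, hs, List.range_succ, List.map_append]; rfl
    have hw : (List.range start).map fW ++ [if fW (start - 1) = 1 then (0:Int) else 1]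
        = (List.range (start + 1)).map fW := by
      rw [fW_succ, hs, List.range_succ, List.map_append]; rfl
    rw [hb, hw]
    exact ih (start + 1) (by omega) (by omega) (by omega)

theorem count_eq (xs sb sw : List Int)
    (hb : ∀ i, i < xs.length → sb.getD i 0 = fB i)
    (hw : ∀ i, i < xs.length → sw.getD i 0 = fW i) :
    ∀ (start : Nat) (ab aw : Int),
    countLoop xs sb sw start ab aw
      = (ab + cb (xs.drop start) start, aw + cw (xs.drop start) start) := by
  intro start
  induction hd : xs.length - start generalizing start with
  | zero =>
    intro ab aw
    rw [countLoop]
    have hge : ¬ start < xs.length := by omega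
    rw [List.drop_eq_nil_of_le (by omega)]
    simp [hge, cb, cw]
  | succ k ih =>
    intro ab aw
    have hlt : start < xs.length := by omega
    rw [countLoop]
    simp only [hlt, dif_pos]
    rw [ih (start + 1) (by omega)]
    have hdrop : xs.drop start = xs[start] :: xs.drop (start + 1) :=
      List.drop_eq_getElem_cons hlt
    rw [hdrop]
    simp only [cb, cw, hb start hlt, hw start hlt]
    have hg : xs.getD start 0 = xs[start] := by
      rw [List.getD_eq_getElem?_getD, List.getElem?_eq_getElem hlt]; rfl
    rw [hg]
    refine Prod.ext ?_ ?_
    · simp only [fB]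
      by_cases h : xs[start] = 1 - (start : Int) % 2
      · simp [h]
      · simp [h, Ne.symm h]; ring
    · simp only [fW]
      by_cases h : xs[start] = (start : Int) % 2
      · simp [h]
      · simp [h, Ne.symm h]; ring

-- the list of histogram keys produced by B's single pass, starting at index s
def keysOf (xs : List Int) (s : Nat) : List (Int × Int) :=
  (PySem.List.enumerate xs (s : Int)).map (fun p => (PySem.Int.mod p.1 2, p.2))

theorem keysOf_nil (s : Nat) : keysOf [] s = [] := by
  simp [keysOf, PySem.List.enumerate_nil]

theorem keysOf_cons (x : Int) (t : List Int) (s : Nat) :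
    keysOf (x :: t) s = (((s % 2 : Nat) : Int), x) :: keysOf t (s + 1) := by
  simp only [keysOf, PySem.List.enumerate_cons, List.map_cons]
  have h1 : ((s : Int) + 1) = ((s + 1 : Nat) : Int) := by push_cast; ring
  rw [h1]
  congr 1
  simp

-- mismatch count vs black pattern + match count (buckets (0,1),(1,0)) = length
theorem cb_count (xs : List Int) : ∀ (s : Nat),
    cb xs s + (((keysOf xs s).count ((0:Int),(1:Int)) : Int)
      + ((keysOf xs s).count ((1:Int),(0:Int)) : Int)) = xs.length := by
  induction xs with
  | nil => intro s; simp [cb, keysOf_nil]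
  | cons x t ih =>
    intro s
    rw [keysOf_cons]
    simp only [cb, List.count_cons, List.length_cons]
    have h1 : ((s : Int) + 1) = ((s + 1 : Nat) : Int) := by push_cast; ring
    rw [h1]
    have ht := ih (s + 1)
    rcases Nat.even_or_odd s with he | ho
    · obtain ⟨j, hj⟩ := he
      have hm : s % 2 = 0 := by omega
      rw [hm]
      have hmod : ((s : Int)) % 2 = 0 := by subst hj; push_cast; omega
      by_cases hx : x = 1
      · simp only [hx, hmod]
        simp only [beq_iff_eq, Prod.mk.injEq]
        norm_num
        push_cast at ht
        omega
      · simp only [hmod]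
        simp only [beq_iff_eq, Prod.mk.injEq]
        simp only [hx]
        norm_num [hx]
        push_cast at ht
        omega
    · obtain ⟨j, hj⟩ := ho
      have hm : s % 2 = 1 := by omega
      rw [hm]
      have hmod : ((s : Int)) % 2 = 1 := by subst hj; push_cast; omega
      by_cases hx : x = 0
      · simp only [hx, hmod]
        simp only [beq_iff_eq, Prod.mk.injEq]
        norm_num
        push_cast at ht
        omega
      · simp only [hmod]
        simp only [beq_iff_eq, Prod.mk.injEq]
        norm_num [hx]
        push_cast at ht
        omega

-- mismatch count vs white pattern + match count (buckets (0,0),(1,1)) = length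
theorem cw_count (xs : List Int) : ∀ (s : Nat),
    cw xs s + (((keysOf xs s).count ((0:Int),(0:Int)) : Int)
      + ((keysOf xs s).count ((1:Int),(1:Int)) : Int)) = xs.length := by
  induction xs with
  | nil => intro s; simp [cw, keysOf_nil]
  | cons x t ih =>
    intro s
    rw [keysOf_cons]
    simp only [cw, List.count_cons, List.length_cons]
    have h1 : ((s : Int) + 1) = ((s + 1 : Nat) : Int) := by push_cast; ring
    rw [h1]
    have ht := ih (s + 1)
    rcases Nat.even_or_odd s with he | ho
    · obtain ⟨j, hj⟩ := he
      have hm : s % 2 = 0 := by omega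
      rw [hm]
      have hmod : ((s : Int)) % 2 = 0 := by subst hj; push_cast; omega
      by_cases hx : x = 0
      · simp only [hx, hmod]
        simp only [beq_iff_eq, Prod.mk.injEq]
        norm_num
        push_cast at ht
        omega
      · simp only [hmod]
        simp only [beq_iff_eq, Prod.mk.injEq]
        norm_num [hx]
        push_cast at ht
        omega
    · obtain ⟨j, hj⟩ := ho
      have hm : s % 2 = 1 := by omega
      rw [hm]
      have hmod : ((s : Int)) % 2 = 1 := by subst hj; push_cast; omega
      by_cases hx : x = 1
      · simp only [hx, hmod]
        simp only [beq_iff_eq, Prod.mk.injEq]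
        norm_num
        push_cast at ht
        omega
      · simp only [hmod]
        simp only [beq_iff_eq, Prod.mk.injEq]
        norm_num [hx]
        push_cast at ht
        omega

-- B's histogram lookup is the key-list count
theorem hist_getD (xs : List Int) (v : Int × Int) :
    ((PySem.List.enumerate xs 0).foldl
      (fun d p =>
        let k := (PySem.Int.mod p.1 2, p.2)
        d.insert k (d.getD k 0 + 1))
      PySem.Dict.empty).getD v 0 = ((keysOf xs 0).count v : Int) := by
  have hk : keysOf xs 0 = (PySem.List.enumerate xs 0).map (fun p => (PySem.Int.mod p.1 2, p.2)) := by
    simp [keysOf]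
  have h2 := List.foldl_map (f := fun p : Int × Int => (PySem.Int.mod p.1 2, p.2))
    (g := fun (d : PySem.Dict (Int × Int) Int) k => d.insert k (d.getD k 0 + 1))
    (l := PySem.List.enumerate xs 0) (init := PySem.Dict.empty)
  have e : (PySem.List.enumerate xs 0).foldl
      (fun d p =>
        let k := (PySem.Int.mod p.1 2, p.2)
        d.insert k (d.getD k 0 + 1))
      (PySem.Dict.empty : PySem.Dict (Int × Int) Int)
      = ((PySem.List.enumerate xs 0).map (fun p => (PySem.Int.mod p.1 2, p.2))).foldl
          (fun d k => d.insert k (d.getD k 0 + 1)) PySem.Dict.empty := h2.symm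
  rw [e, PySem.Dict.getD_foldl_insert_add_one, hk.symm]
  simp

-- ===== VERDICT (by name: the statement is the Claim_ definition above) =====
theorem assignment_spec : Claim_equal_assignment := by
  intro fence _hdom
  unfold Spec_assignment
  have hB : assignment_alt fence
      = (fence.length : Int) -
        max (((keysOf fence 0).count ((0:Int),(1:Int)) : Int)
              + ((keysOf fence 0).count ((1:Int),(0:Int)) : Int))
            (((keysOf fence 0).count ((0:Int),(0:Int)) : Int)
              + ((keysOf fence 0).count ((1:Int),(1:Int)) : Int)) := by
    simp only [assignment_alt, hist_getD]
  rw [hB]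
  have hcb := cb_count fence 0
  have hcw := cw_count fence 0
  rcases fence with _ | ⟨x, t⟩
  · simp [assignment, fillLoop, countLoop, keysOf_nil]
  · set xs := x :: t with hxs
    have hn : 1 ≤ xs.length := by simp [hxs]
    have h1 : [(1 : Int)] = (List.range 1).map fB := by decide
    have h0 : [(0 : Int)] = (List.range 1).map fW := by decide
    simp only [assignment]
    rw [h1, h0, fill_eq xs.length 1 le_rfl hn]
    rw [count_eq xs _ _
      (fun i hi => getD_range_map fB xs.length i hi)
      (fun i hi => getD_range_map fW xs.length i hi) 0 0 0]
    simp only [List.drop_zero, zero_add]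
    have hc : (0 : Int) = ((0 : Nat) : Int) := rfl
    rw [hc] at hcb hcw ⊢
    omega
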